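-- pv_equiv track=rewrite | github.com/MSFT-Codeforces/weighted_sliding_display | misc/test_case_validator.py | validate
-- ===== SOURCE A (Python) =====
-- def is_valid_int_token(tok: str) -> bool:
--     if tok == "":
--         return False
--     if tok[0] == "-":
--         return len(tok) > 1 and tok[1:].isdigit()
--     return tok.isdigit()
--
-- def check_line_strict(line: str) -> bool:
--     # Strict formatting:
--     # - no empty lines
--     # - no leading/trailing spaces
--     # - no tabs
--     # - no multiple spaces between tokens
--     if line == "":
--         return False
--     if line != line.strip():
--         return False
--     if "\t" in line:
--         return False
--     if "  " in line:
--         return False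
--     return True
--
-- def validate(data: str) -> bool:
--     lines = data.splitlines()
--
--     if not lines:
--         return False
--
--     for ln in lines:
--         if not check_line_strict(ln):
--             return False
--
--     idx = 0
--
--     # t
--     first = lines[idx].split(" ")
--     if len(first) != 1 or not is_valid_int_token(first[0]):
--         return False
--     t = int(first[0])
--     if not (1 <= t <= 20):
--         return False
--     idx += 1
--
--     total_n = 0
--
--     for _ in range(t):
--         if idx + 2 >= len(lines):
--             return False
--
--         # n
--         parts = lines[idx].split(" ")
--         if len(parts) != 1 or not is_valid_int_token(parts[0]):
--             return False
--         n = int(parts[0])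
--         if not (1 <= n <= 2000):
--             return False
--         total_n += n
--         if total_n > 2000:
--             return False
--         idx += 1
--
--         # a_1..a_n
--         a_parts = lines[idx].split(" ")
--         if len(a_parts) != n:
--             return False
--         for tok in a_parts:
--             if not is_valid_int_token(tok):
--                 return False
--             val = int(tok)
--             if not (1 <= val <= 10**9):
--                 return False
--         idx += 1
--
--         # w_1..w_n
--         w_parts = lines[idx].split(" ")
--         if len(w_parts) != n:
--             return False
--         for tok in w_parts:
--             if not is_valid_int_token(tok):
--                 return False
--             val = int(tok)
--             if not (-10**6 <= val <= 10**6):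
--                 return False
--         idx += 1
--
--     return idx == len(lines)
-- ===== SOURCE B (Python) =====
-- def _strict(line: str) -> bool:
--     return (line != "" and line == line.strip()
--             and "\t" not in line and "  " not in line)
--
-- def _intval(tok):
--     # value of a plain integer token ('-' allowed only as a sign), else None
--     if tok.isdigit() or (tok.startswith("-") and tok[1:].isdigit()):
--         return int(tok)
--     return None
--
-- def _single(line, lo, hi):
--     # a line holding exactly one integer in [lo, hi], else None
--     parts = line.split(" ")
--     if len(parts) != 1:
--         return None
--     v = _intval(parts[0])
--     if v is None or not (lo <= v <= hi):
--         return None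
--     return v
--
-- def _row_ok(line, n, lo, hi):
--     # a line holding exactly n integers, each in [lo, hi]
--     parts = line.split(" ")
--     if len(parts) != n:
--         return False
--     return all(v is not None and lo <= v <= hi
--                for v in map(_intval, parts))
--
-- def validate(data: str) -> bool:
--     # Shape-first, declarative: instead of a stateful cursor with early exits,
--     # check the global shape equation len(lines) == 1 + 3*t, then validate the
--     # t blocks independently and check the aggregate sum of the n's.
--     lines = data.splitlines()
--     if not lines or not all(map(_strict, lines)):
--         return False
--     t = _single(lines[0], 1, 20)
--     if t is None or len(lines) != 1 + 3 * t:
--         return False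
--     ns = [_single(lines[1 + 3 * k], 1, 2000) for k in range(t)]
--     if None in ns or sum(ns) > 2000:
--         return False
--     rows = [(lines[2 + 3 * k], lines[3 + 3 * k]) for k in range(t)]
--     return all(_row_ok(a, n, 1, 10 ** 9) and _row_ok(w, n, -10 ** 6, 10 ** 6)
--                for (a, w), n in zip(rows, ns))
-- ===== Notes on version B (the rewrite author's own statement) =====
-- stated objective: alternative
-- what changed: B replaces A's stateful cursor parse (index idx, running total_n, per-iteration EOF checks and early exits interleaved with parsing) by a shape-first declarative validation: it checks the global shape equation len(lines) == 1 + 3*t once, builds the list of block sizes ns by direct index arithmetic, compares sum(ns) to the aggregate bound, and validates all value rows as one conjunction over zip(rows, ns); equal because all n's are >= 1, so some prefix total exceeding 2000 is equivalent to the full sum exceeding it, and a boolean conjunction is order-independent.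
import Mathlib
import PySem

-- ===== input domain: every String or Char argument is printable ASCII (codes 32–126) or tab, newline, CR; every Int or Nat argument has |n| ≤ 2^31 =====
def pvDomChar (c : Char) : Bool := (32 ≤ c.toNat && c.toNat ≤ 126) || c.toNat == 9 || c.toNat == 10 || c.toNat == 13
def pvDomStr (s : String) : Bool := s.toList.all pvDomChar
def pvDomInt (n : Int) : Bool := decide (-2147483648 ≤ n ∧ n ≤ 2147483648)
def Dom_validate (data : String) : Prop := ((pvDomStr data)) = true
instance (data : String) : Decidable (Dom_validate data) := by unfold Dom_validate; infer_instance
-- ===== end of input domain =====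

-- B replaces A's stateful cursor parse (running index and running total with early exits)
-- by a shape-first declarative validation: check len(lines) == 1 + 3*t once, collect the
-- block sizes, compare their sum to the aggregate bound, validate all rows as one
-- conjunction; objective: alternative decomposition, same cost.

-- ===== PORT A =====
def aIsValidIntToken (tok : String) : Bool :=
  if tok == "" then false
  else if PySem.Str.pyGet? tok 0 == some '-' then
    decide (1 < PySem.Str.len tok) && PySem.Str.strIsdigit (PySem.Str.slice tok (some 1) none)
  else PySem.Str.strIsdigit tok

def aCheckLineStrict (line : String) : Bool :=
  if line == "" then false
  else if !(line == PySem.Str.strip line) then false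
  else if PySem.Str.isIn "\t" line then false
  else if PySem.Str.isIn "  " line then false
  else true

-- the 'for _ in range(t)' loop with mutable idx/total_n; int(s) after is_valid_int_token
-- always succeeds, ported as (ofStr? s).getD 0; split(" ") has a nonempty sep, so .getD []
def aLoop (lines : List String) : Nat → Nat → Int → Bool
  | 0, idx, _ => idx == lines.length
  | k+1, idx, totalN =>
    if lines.length ≤ idx + 2 then false
    else
      let parts := (PySem.Str.split? (lines.getD idx "") " ").getD []
      if !(parts.length == 1) || !aIsValidIntToken (parts.getD 0 "") then false
      else
        let n := (PySem.Int.ofStr? (parts.getD 0 "")).getD 0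
        if ¬ (1 ≤ n ∧ n ≤ 2000) then false
        else
          let totalN := totalN + n
          if 2000 < totalN then false
          else
            let aParts := (PySem.Str.split? (lines.getD (idx+1) "") " ").getD []
            if !((aParts.length : Int) == n) then false
            else if !(aParts.all fun tok =>
                aIsValidIntToken tok &&
                decide (1 ≤ (PySem.Int.ofStr? tok).getD 0 ∧ (PySem.Int.ofStr? tok).getD 0 ≤ 1000000000)) then false
            else
              let wParts := (PySem.Str.split? (lines.getD (idx+2) "") " ").getD []
              if !((wParts.length : Int) == n) then false
              else if !(wParts.all fun tok =>
                  aIsValidIntToken tok &&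
                  decide (-1000000 ≤ (PySem.Int.ofStr? tok).getD 0 ∧ (PySem.Int.ofStr? tok).getD 0 ≤ 1000000)) then false
              else aLoop lines k (idx+3) totalN

def validate (data : String) : Bool :=
  let lines := PySem.Str.splitlines data
  if lines.isEmpty then false
  else if !(lines.all aCheckLineStrict) then false
  else
    let first := (PySem.Str.split? (lines.getD 0 "") " ").getD []
    if !(first.length == 1) || !aIsValidIntToken (first.getD 0 "") then false
    else
      let t := (PySem.Int.ofStr? (first.getD 0 "")).getD 0
      if ¬ (1 ≤ t ∧ t ≤ 20) then false
      else aLoop lines t.toNat 1 0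

-- ===== PORT B =====
def bStrict (line : String) : Bool :=
  !(line == "") && (line == PySem.Str.strip line)
    && !(PySem.Str.isIn "\t" line) && !(PySem.Str.isIn "  " line)

-- int(tok) under the guard always succeeds in Python; ported as (ofStr? tok).getD 0
def bIntVal (tok : String) : Option Int :=
  if PySem.Str.strIsdigit tok
      || (PySem.Str.startswith tok "-" && PySem.Str.strIsdigit (PySem.Str.slice tok (some 1) none)) then
    some ((PySem.Int.ofStr? tok).getD 0)
  else none

def bSingle (line : String) (lo hi : Int) : Option Int :=
  let parts := (PySem.Str.split? line " ").getD []
  if !(parts.length == 1) then none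
  else
    match bIntVal (parts.getD 0 "") with
    | none => none
    | some v => if ¬ (lo ≤ v ∧ v ≤ hi) then none else some v

def bRowOk (line : String) (n lo hi : Int) : Bool :=
  let parts := (PySem.Str.split? line " ").getD []
  if !((parts.length : Int) == n) then false
  else (parts.map bIntVal).all fun v =>
    match v with
    | none => false
    | some v => decide (lo ≤ v ∧ v ≤ hi)

-- 'None in ns or sum(ns) > 2000': Python's or short-circuits before sum(ns) can see a
-- None; the port's sum of (·.getD 0) is total, so plain || computes the same Bool.
def validate_alt (data : String) : Bool :=
  let lines := PySem.Str.splitlines data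
  if lines.isEmpty || !(lines.all bStrict) then false
  else
    match bSingle (lines.getD 0 "") 1 20 with
    | none => false
    | some t =>
      if !((lines.length : Int) == 1 + 3 * t) then false
      else
        let ns := (PySem.List.pyRange 0 t 1).map fun k =>
          bSingle (lines.getD (1 + 3 * k).toNat "") 1 2000
        if ns.contains none || decide (2000 < (ns.map (fun v => v.getD 0)).sum) then false
        else
          let rows := (PySem.List.pyRange 0 t 1).map fun k =>
            (lines.getD (2 + 3 * k).toNat "", lines.getD (3 + 3 * k).toNat "")
          (rows.zip ns).all fun p =>
            bRowOk p.1.1 (p.2.getD 0) 1 1000000000 && bRowOk p.1.2 (p.2.getD 0) (-1000000) 1000000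

-- ===== PRECONDITION & SPEC =====
def Spec_validate (data : String) (out : Bool) : Prop := out = validate_alt data
instance (data : String) (out : Bool) : Decidable (Spec_validate data out) := by unfold Spec_validate; infer_instance

-- ===== CLAIM (what is proved, stated in full; the proofs are below) =====
def Claim_equal_validate : Prop := ∀ (data : String), Dom_validate data → Spec_validate data (validate data)

-- ===== LEMMAS AND PROOFS =====

-- proof-side bridge: A's loop body with length checks stripped and Bool conjunction
def specB (lines : List String) : Nat → Nat → Int → Bool
  | 0, _, _ => true
  | k+1, idx, total =>
    match bSingle (lines.getD idx "") 1 2000 with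
    | none => false
    | some n =>
      !(decide (2000 < total + n)) && bRowOk (lines.getD (idx+1) "") n 1 1000000000
        && bRowOk (lines.getD (idx+2) "") n (-1000000) 1000000
        && specB lines k (idx+3) (total+n)

theorem strict_eq (line : String) : aCheckLineStrict line = bStrict line := by
  unfold aCheckLineStrict bStrict
  cases line == "" <;> cases line == PySem.Str.strip line <;>
    cases PySem.Str.isIn "\t" line <;> cases PySem.Str.isIn "  " line <;> rfl

theorem tokenList (l : List Char) :
    (if PySem.List.pyGet? l 0 = some '-' then
        decide (1 < (l.length : Int)) && PySem.Chars.strIsdigit (PySem.List.slice l (some 1))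
      else PySem.Chars.strIsdigit l)
    = (PySem.Chars.strIsdigit l ||
        (PySem.Chars.startswith l ['-'] && PySem.Chars.strIsdigit (PySem.List.slice l (some 1)))) := by
  rcases l with _ | ⟨c, cs⟩
  · simp [PySem.List.pyGet?, PySem.Chars.strIsdigit, PySem.Chars.startswith]
  · have hsl : PySem.List.slice (c :: cs) (some 1) = cs := by
      rw [PySem.List.slice_from _ (by norm_num : (0:Int) ≤ 1)]; rfl
    rw [PySem.List.pyGet?_zero_cons, hsl]
    by_cases hc : c = '-'
    · subst hc
      have hsw : PySem.Chars.startswith ('-' :: cs) ['-'] = true :=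
        (PySem.Chars.startswith_iff _ _).mpr ⟨cs, rfl⟩
      have hd : PySem.Chars.strIsdigit ('-' :: cs) = false := by
        simp [PySem.Chars.strIsdigit, PySem.Chars.isdigit]
      rw [hd, hsw]
      rcases cs with _ | ⟨d, ds⟩
      · simp [PySem.Chars.strIsdigit]
      · simp [PySem.Chars.strIsdigit]
    · have hsw : PySem.Chars.startswith (c :: cs) ['-'] = false := by
        apply Bool.eq_false_iff.mpr
        intro htrue
        rcases (PySem.Chars.startswith_iff _ _).mp htrue with ⟨ttl, heq⟩
        simp only [List.cons_append, List.nil_append, List.cons.injEq] at heq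
        exact hc heq.1.symm
      rw [if_neg (by simp [hc]), hsw]
      simp

theorem token_guard_eq (tok : String) :
    aIsValidIntToken tok =
      (PySem.Str.strIsdigit tok
        || (PySem.Str.startswith tok "-"
            && PySem.Str.strIsdigit (PySem.Str.slice tok (some 1) none))) := by
  unfold aIsValidIntToken
  by_cases hnil : tok = ""
  · simp [hnil, PySem.Str.strIsdigit, PySem.Chars.strIsdigit, PySem.Str.startswith,
      PySem.Chars.startswith]
  · rw [(by simp [hnil] : (tok == "") = false)]
    simp only [Bool.not_false, Bool.true_and, Bool.false_eq_true, if_false]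
    simp only [PySem.Str.strIsdigit_eq, PySem.Str.len_eq, PySem.Str.toList_slice,
      PySem.Str.pyGet?_eq, PySem.Chars.pyGet?_eq_listPyGet?, PySem.Chars.slice_eq_listSlice,
      PySem.Str.startswith_eq, beq_iff_eq]
    exact tokenList tok.toList

theorem bIntVal_eq (tok : String) :
    bIntVal tok =
      (if aIsValidIntToken tok then some ((PySem.Int.ofStr? tok).getD 0) else none) := by
  unfold bIntVal; rw [token_guard_eq]

theorem tokcheck (lo hi : Int) (tok : String) :
    (match bIntVal tok with
      | none => false
      | some v => decide (lo ≤ v ∧ v ≤ hi)) =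
    (aIsValidIntToken tok &&
      decide (lo ≤ (PySem.Int.ofStr? tok).getD 0 ∧ (PySem.Int.ofStr? tok).getD 0 ≤ hi)) := by
  rw [bIntVal_eq]
  cases h : aIsValidIntToken tok <;> simp

theorem rowOk_eq (line : String) (n lo hi : Int) :
    bRowOk line n lo hi =
      (((((PySem.Str.split? line " ").getD []).length : Int) == n)
        && ((PySem.Str.split? line " ").getD []).all (fun tok =>
              aIsValidIntToken tok &&
              decide (lo ≤ (PySem.Int.ofStr? tok).getD 0 ∧ (PySem.Int.ofStr? tok).getD 0 ≤ hi))) := by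
  unfold bRowOk
  cases hlen : ((((PySem.Str.split? line " ").getD []).length : Int) == n)
  · simp [hlen]
  · simp only [hlen, Bool.not_true, Bool.false_eq_true, if_false, Bool.true_and, List.all_map]
    congr 1
    funext tok
    exact tokcheck lo hi tok

theorem single_eq (line : String) (lo hi : Int) :
    bSingle line lo hi =
      (let parts := (PySem.Str.split? line " ").getD []
       if !(parts.length == 1) || !aIsValidIntToken (parts.getD 0 "") then none
       else
         let v := (PySem.Int.ofStr? (parts.getD 0 "")).getD 0
         if ¬ (lo ≤ v ∧ v ≤ hi) then none else some v) := by
  unfold bSingle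
  simp only [bIntVal_eq]
  cases hlen : ((PySem.Str.split? line " ").getD []).length == 1
  · simp [hlen]
  · cases hv : aIsValidIntToken (((PySem.Str.split? line " ").getD []).getD 0 "") <;>
      simp [hlen, hv]

theorem single_bounds (line : String) (lo hi v : Int)
    (h : bSingle line lo hi = some v) : lo ≤ v ∧ v ≤ hi := by
  unfold bSingle at h
  simp only at h
  split at h
  · cases h
  · split at h
    · cases h
    · split at h
      · cases h
      · rename_i hbnd
        cases h
        exact not_not.mp hbnd

theorem main_loop (lines : List String) :
    ∀ (k idx : Nat) (total : Int),
      aLoop lines k idx total =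
        (decide (lines.length = idx + 3 * k) && specB lines k idx total) := by
  intro k
  induction k with
  | zero =>
    intro idx total
    unfold aLoop specB
    by_cases h : idx = lines.length
    · simp [h]
    · have h2 : ¬ lines.length = idx := fun hh => h hh.symm
      simp [h, h2]
  | succ k ih =>
    intro idx total
    unfold aLoop specB
    by_cases hb : lines.length ≤ idx + 2
    · rw [if_pos hb]
      have hd : decide (lines.length = idx + 3 * (k+1)) = false := by
        simp; omega
      rw [hd, Bool.false_and]
    · rw [if_neg hb, single_eq]
      simp only
      cases hc1 : (!(((PySem.Str.split? (lines.getD idx "") " ").getD []).length == 1)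
          || !aIsValidIntToken (((PySem.Str.split? (lines.getD idx "") " ").getD []).getD 0 ""))
      · simp only [hc1, Bool.false_eq_true, if_false]
        by_cases hbnd : (1 ≤ (PySem.Int.ofStr? (((PySem.Str.split? (lines.getD idx "") " ").getD []).getD 0 "")).getD 0
            ∧ (PySem.Int.ofStr? (((PySem.Str.split? (lines.getD idx "") " ").getD []).getD 0 "")).getD 0 ≤ 2000)
        · rw [if_neg (not_not_intro hbnd), if_neg (not_not_intro hbnd)]
          simp only
          by_cases ht : 2000 < total + (PySem.Int.ofStr? (((PySem.Str.split? (lines.getD idx "") " ").getD []).getD 0 "")).getD 0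
          · rw [if_pos ht]
            have hnd : decide (2000 < total + (PySem.Int.ofStr? (((PySem.Str.split? (lines.getD idx "") " ").getD []).getD 0 "")).getD 0) = true := decide_eq_true ht
            rw [hnd]
            simp
          · rw [if_neg ht]
            rw [rowOk_eq (lines.getD (idx+1) ""), rowOk_eq (lines.getD (idx+2) "")]
            rw [ih (idx+3) (total + (PySem.Int.ofStr? (((PySem.Str.split? (lines.getD idx "") " ").getD []).getD 0 "")).getD 0)]
            have harith : idx + 3 + 3 * k = idx + 3 * (k + 1) := by ring
            rw [harith]
            cases hr1 : ((((PySem.Str.split? (lines.getD (idx+1) "") " ").getD []).length : Int)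
                == (PySem.Int.ofStr? (((PySem.Str.split? (lines.getD idx "") " ").getD []).getD 0 "")).getD 0)
            · simp [hr1, ht]
            · cases ha1 : ((PySem.Str.split? (lines.getD (idx+1) "") " ").getD []).all (fun tok =>
                  aIsValidIntToken tok &&
                  decide (1 ≤ (PySem.Int.ofStr? tok).getD 0 ∧ (PySem.Int.ofStr? tok).getD 0 ≤ 1000000000))
              · simp [hr1, ha1, ht]
              · cases hr2 : ((((PySem.Str.split? (lines.getD (idx+2) "") " ").getD []).length : Int)
                    == (PySem.Int.ofStr? (((PySem.Str.split? (lines.getD idx "") " ").getD []).getD 0 "")).getD 0)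
                · simp [hr1, ha1, hr2, ht]
                · cases ha2 : ((PySem.Str.split? (lines.getD (idx+2) "") " ").getD []).all (fun tok =>
                      aIsValidIntToken tok &&
                      decide (-1000000 ≤ (PySem.Int.ofStr? tok).getD 0 ∧ (PySem.Int.ofStr? tok).getD 0 ≤ 1000000))
                  · simp [hr1, ha1, hr2, ha2, ht]
                  · simp only [hr1, ha1, hr2, ha2, ht, Bool.not_true, Bool.false_eq_true, if_false,
                      decide_false, Bool.not_false, Bool.true_and, Bool.and_true]
        · rw [if_pos hbnd, if_pos hbnd]
          simp
      · simp [hc1]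

theorem sum_nonneg_of_no_none (lines : List String) (ks : List Int)
    (h : (ks.map fun k => bSingle (lines.getD (1 + 3 * k).toNat "") 1 2000).contains none = false) :
    0 ≤ ((ks.map fun k => bSingle (lines.getD (1 + 3 * k).toNat "") 1 2000).map
          (fun v => v.getD 0)).sum := by
  induction ks with
  | nil => simp
  | cons k ks ih =>
    simp only [List.map_cons, List.contains_cons, Bool.or_eq_false_iff] at h ⊢
    rcases hb : bSingle (lines.getD (1 + 3 * k).toNat "") 1 2000 with _ | v
    · rw [hb] at h; simp at h
    · rw [hb] at h
      have hv := single_bounds _ _ _ _ hb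
      have := ih h.2
      simp only [List.sum_cons, Option.getD_some]
      omega

theorem b_tail (lines : List String) :
    ∀ (m j : Nat) (total : Int), total ≤ 2000 →
      (let ks := PySem.List.pyRange (j : Int) ((j : Int) + (m : Int)) 1
       let ns := ks.map fun k => bSingle (lines.getD (1 + 3 * k).toNat "") 1 2000
       let rows := ks.map fun k => (lines.getD (2 + 3 * k).toNat "", lines.getD (3 + 3 * k).toNat "")
       if ns.contains none || decide (2000 < total + (ns.map (fun v => v.getD 0)).sum) then false
       else (rows.zip ns).all fun p =>
         bRowOk p.1.1 (p.2.getD 0) 1 1000000000 && bRowOk p.1.2 (p.2.getD 0) (-1000000) 1000000)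
      = specB lines m (1 + 3 * j) total := by
  intro m
  induction m with
  | zero =>
    intro j total htot
    simp only [Nat.cast_zero, add_zero]
    rw [show PySem.List.pyRange (j:Int) (j:Int) 1 = [] from by simp [PySem.List.pyRange]]
    simp only [List.map_nil, List.contains_nil, List.map_nil, List.sum_nil, add_zero,
      List.zip_nil_right, List.all_nil]
    rw [if_neg (by simp; omega)]
    rfl
  | succ m ih =>
    intro j total htot
    have hcons : PySem.List.pyRange (j:Int) ((j:Int) + ((m+1 : Nat) : Int)) 1
        = (j:Int) :: PySem.List.pyRange ((j:Int)+1) ((j:Int) + ((m+1 : Nat) : Int)) 1 :=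
      PySem.List.pyRange_one_cons (by push_cast; omega)
    have hre : ((j:Int)+1) = ((j+1 : Nat) : Int) := by push_cast; ring
    have hre2 : (j:Int) + ((m+1 : Nat) : Int) = ((j+1 : Nat) : Int) + ((m : Nat) : Int) := by
      push_cast; ring
    rw [hcons, hre, hre2]
    have hidx1 : (1 + 3 * (j:Int)).toNat = 1 + 3*j := by omega
    have hidx2 : (2 + 3 * (j:Int)).toNat = 2 + 3*j := by omega
    have hidx3 : (3 + 3 * (j:Int)).toNat = 3 + 3*j := by omega
    simp only [List.map_cons, hidx1, hidx2, hidx3]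
    unfold specB
    cases hb : bSingle (lines.getD (1 + 3*j) "") 1 2000 with
    | none => simp
    | some n =>
      have hn := single_bounds _ _ _ _ hb
      simp only [List.contains_cons, List.map_cons, List.sum_cons,
        List.zip_cons_cons, List.all_cons, Option.getD_some]
      have hhead : ((none : Option Int) == some n) = false := by rfl
      rw [hhead, Bool.false_or]
      have hIH := ih (j+1) (total+n)
      simp only at hIH
      by_cases ht : 2000 < total + n
      · rw [(by simp [ht] : (!decide (2000 < total + n)) = false), Bool.false_and]
        cases hnone : ((PySem.List.pyRange ((j+1 : Nat) : Int) (((j+1 : Nat) : Int) + ((m : Nat) : Int)) 1).map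
            (fun k => bSingle (lines.getD (1 + 3 * k).toNat "") 1 2000)).contains none
        · rw [if_pos]
          · simp
          · have hs := sum_nonneg_of_no_none lines _ hnone
            rw [Bool.false_or]
            exact decide_eq_true (by omega)
        · rw [if_pos (by simp)]
          simp
      · rw [(by simp [ht] : (!decide (2000 < total + n)) = true), Bool.true_and,
          show 1 + 3*j + 1 = 2 + 3*j from by omega,
          show 1 + 3*j + 2 = 3 + 3*j from by omega,
          show 1 + 3*j + 3 = 1 + 3*(j+1) from by omega]
        cases hC : ((PySem.List.pyRange ((j+1 : Nat) : Int) (((j+1 : Nat) : Int) + ((m : Nat) : Int)) 1).map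
              (fun k => bSingle (lines.getD (1 + 3 * k).toNat "") 1 2000)).contains none
        · by_cases hS : 2000 < total + (n + ((((PySem.List.pyRange ((j+1 : Nat) : Int) (((j+1 : Nat) : Int) + ((m : Nat) : Int)) 1).map
              (fun k => bSingle (lines.getD (1 + 3 * k).toNat "") 1 2000)).map (fun v => v.getD 0)).sum))
          · have hspec : specB lines m (1 + 3*(j+1)) (total+n) = false := by
              rw [← hIH (by omega), hC]
              rw [if_pos]
              rw [Bool.false_or]
              exact decide_eq_true (by omega)
            rw [hspec, if_pos]
            · simp
            · rw [Bool.false_or]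
              exact decide_eq_true hS
          · have hspec : specB lines m (1 + 3*(j+1)) (total+n) =
                (((PySem.List.pyRange ((j+1 : Nat) : Int) (((j+1 : Nat) : Int) + ((m : Nat) : Int)) 1).map
                    (fun k => (lines.getD (2 + 3 * k).toNat "", lines.getD (3 + 3 * k).toNat ""))).zip
                  ((PySem.List.pyRange ((j+1 : Nat) : Int) (((j+1 : Nat) : Int) + ((m : Nat) : Int)) 1).map
                    (fun k => bSingle (lines.getD (1 + 3 * k).toNat "") 1 2000))).all
                  (fun p => bRowOk p.1.1 (p.2.getD 0) 1 1000000000 && bRowOk p.1.2 (p.2.getD 0) (-1000000) 1000000) := by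
              rw [← hIH (by omega), hC]
              rw [if_neg]
              rw [Bool.false_or]
              simp only [decide_eq_true_eq]
              omega
            rw [hspec, if_neg (by
              rw [Bool.false_or]
              simp only [decide_eq_true_eq]
              omega)]
        · have hspec : specB lines m (1 + 3*(j+1)) (total+n) = false := by
            rw [← hIH (by omega), hC]
            simp
          rw [hspec, if_pos (by simp)]
          simp


-- ===== VERDICT (by name: the statement is the Claim_ definition above) =====
theorem validate_spec : Claim_equal_validate := by
  intro data _
  unfold Spec_validate validate validate_alt
  simp only
  by_cases he : (PySem.Str.splitlines data).isEmpty
  · rw [if_pos he, if_pos (by rw [he]; rfl)]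
  · have hfe : bStrict = aCheckLineStrict := funext fun l => (strict_eq l).symm
    have hef : (PySem.Str.splitlines data).isEmpty = false := by simpa using he
    by_cases hall : (PySem.Str.splitlines data).all aCheckLineStrict = true
    swap
    · have hallf : (PySem.Str.splitlines data).all aCheckLineStrict = false := by
        simpa using hall
      rw [if_neg he, if_pos (by rw [hallf]; rfl), if_pos (by rw [hef, hfe, hallf]; rfl)]
    · have hbcond : ¬ (((PySem.Str.splitlines data).isEmpty
          || !(PySem.Str.splitlines data).all bStrict) = true) := by
        rw [hef, hfe, hall]; simp
      rw [if_neg he, hall, if_neg (by simp), if_neg hbcond]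
      rw [single_eq]
      simp only
      cases hc1 : (!(((PySem.Str.split? ((PySem.Str.splitlines data).getD 0 "") " ").getD []).length == 1)
          || !aIsValidIntToken (((PySem.Str.split? ((PySem.Str.splitlines data).getD 0 "") " ").getD []).getD 0 ""))
      · simp only [Bool.false_eq_true, if_false]
        by_cases hbnd : (1 ≤ (PySem.Int.ofStr? (((PySem.Str.split? ((PySem.Str.splitlines data).getD 0 "") " ").getD []).getD 0 "")).getD 0
            ∧ (PySem.Int.ofStr? (((PySem.Str.split? ((PySem.Str.splitlines data).getD 0 "") " ").getD []).getD 0 "")).getD 0 ≤ 20)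
        · rw [if_neg (not_not_intro hbnd), if_neg (not_not_intro hbnd)]
          simp only
          rw [main_loop]
          set lines := PySem.Str.splitlines data with hlines
          set t := (PySem.Int.ofStr? (((PySem.Str.split? (lines.getD 0 "") " ").getD []).getD 0 "")).getD 0 with hT
          by_cases hshape : (lines.length : Int) = 1 + 3 * t
          · rw [if_neg (by simp [hshape])]
            have hdec : decide (lines.length = 1 + 3 * t.toNat) = true := by
              apply decide_eq_true
              omega
            rw [hdec, Bool.true_and]
            have hbt := b_tail lines t.toNat 0 0 (by norm_num)
            have hcast : ((t.toNat : Nat) : Int) = t := Int.toNat_of_nonneg (by omega)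
            simp only [Nat.cast_zero, zero_add, hcast, Nat.mul_zero, Nat.add_zero] at hbt
            exact hbt.symm
          · rw [if_pos (by simp [hshape])]
            have hdec : decide (lines.length = 1 + 3 * t.toNat) = false := by
              apply decide_eq_false
              intro hh
              apply hshape
              omega
            rw [hdec, Bool.false_and]
        · rw [if_pos hbnd, if_pos hbnd]
      · simp
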